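-- pv_equiv track=rewrite | github.com/antmp27/Picochess_V4_beta_amp27 | dgt/display.py | _move_language
-- ===== SOURCE A (Python) =====
-- def _move_language(text: str, language: str, capital: bool, short: bool):
--     """Return move text for clock display."""
--     if short:
--         directory = {}
--         if language == "de":
--             directory = {"R": "T", "N": "S", "B": "L", "Q": "D"}
--         if language == "nl":
--             directory = {"R": "T", "N": "P", "B": "L", "Q": "D"}
--         if language == "fr":
--             directory = {"R": "T", "N": "C", "B": "F", "Q": "D", "K": "@"}
--         if language == "es":
--             directory = {"R": "T", "N": "C", "B": "A", "Q": "D", "K": "@"}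
--         if language == "it":
--             directory = {"R": "T", "N": "C", "B": "A", "Q": "D", "K": "@"}
--         for i, j in directory.items():
--             text = text.replace(i, j)
--         text = text.replace("@", "R")  # replace the King "@" from fr, es, it languages
--     if capital:
--         return text.upper()
--     else:
--         return text
-- ===== SOURCE B (Python) =====
-- _PIECES = {"de": "TSLD", "nl": "TPLD", "fr": "TCFD", "es": "TCAD", "it": "TCAD"}
-- _KING_AS_ROOK = ("fr", "es", "it")
--
--
-- def _make_table(language):
--     """One char->char translation table per language, '@' trick flattened."""
--     table = {ord("@"): "R"}
--     letters = _PIECES.get(language)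
--     if letters:
--         for src, dst in zip("RNBQ", letters):
--             table[ord(src)] = dst
--         if language in _KING_AS_ROOK:
--             table[ord("K")] = "R"
--     return table
--
--
-- _TABLES = {lang: _make_table(lang) for lang in _PIECES}
-- _DEFAULT_TABLE = _make_table(None)
--
--
-- def _move_language(text: str, language: str, capital: bool, short: bool):
--     """Return move text for clock display."""
--     if short:
--         text = text.translate(_TABLES.get(language, _DEFAULT_TABLE))
--     return text.upper() if capital else text
-- ===== Notes on version B (the rewrite author's own statement) =====
-- stated objective: idiomatic
-- what changed: Replaces A's per-language chain of ordered str.replace scans plus the '@' placeholder round-trip by one precomputed char->char translation table per language (K mapped to R directly for fr/es/it, '@'->'R' kept for every language) applied in a single text.translate pass.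
import Mathlib
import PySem

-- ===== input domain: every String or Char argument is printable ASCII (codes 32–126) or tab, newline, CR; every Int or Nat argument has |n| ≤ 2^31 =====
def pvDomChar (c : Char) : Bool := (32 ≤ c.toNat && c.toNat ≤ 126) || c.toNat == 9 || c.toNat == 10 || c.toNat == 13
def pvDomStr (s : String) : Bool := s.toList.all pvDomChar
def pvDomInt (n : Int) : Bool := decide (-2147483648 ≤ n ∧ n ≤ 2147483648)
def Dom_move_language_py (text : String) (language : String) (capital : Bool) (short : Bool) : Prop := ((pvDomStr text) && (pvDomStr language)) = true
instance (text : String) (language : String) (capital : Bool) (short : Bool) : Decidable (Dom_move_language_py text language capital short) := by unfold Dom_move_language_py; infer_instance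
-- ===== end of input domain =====

-- B replaces A's chain of ordered str.replace scans (with the '@' placeholder trick)
-- by one precomputed char-translation table per language applied in a single pass (idiomatic; return value only).

-- ===== PORT A =====
def move_language_py (text : String) (language : String) (capital : Bool) (short : Bool) : String :=
  let text :=
    if short then
      let directory : PySem.Dict String String := PySem.Dict.ofList []
      let directory := if language = "de" then PySem.Dict.ofList [("R","T"),("N","S"),("B","L"),("Q","D")] else directory
      let directory := if language = "nl" then PySem.Dict.ofList [("R","T"),("N","P"),("B","L"),("Q","D")] else directory
      let directory := if language = "fr" then PySem.Dict.ofList [("R","T"),("N","C"),("B","F"),("Q","D"),("K","@")] else directory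
      let directory := if language = "es" then PySem.Dict.ofList [("R","T"),("N","C"),("B","A"),("Q","D"),("K","@")] else directory
      let directory := if language = "it" then PySem.Dict.ofList [("R","T"),("N","C"),("B","A"),("Q","D"),("K","@")] else directory
      let text := directory.items.foldl (fun t ij => PySem.Str.replace t ij.1 ij.2) text
      PySem.Str.replace text "@" "R"
    else text
  if capital then PySem.Str.upper text else text

-- ===== PORT B =====
-- piece letters R,N,B,Q per language (Source B's _PIECES table)
def altPieces (language : String) : Option (Char × Char × Char × Char) :=
  if language = "de" then some ('T','S','L','D')
  else if language = "nl" then some ('T','P','L','D')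
  else if language = "fr" then some ('T','C','F','D')
  else if language = "es" then some ('T','C','A','D')
  else if language = "it" then some ('T','C','A','D')
  else none

def altKingAsRook (language : String) : Bool :=
  language = "fr" || language = "es" || language = "it"

-- the precomputed translation table of Source B, as a char function
def altTrans (language : String) (c : Char) : Char :=
  if c = '@' then 'R'
  else
    match altPieces language with
    | none => c
    | some (r, n, b, q) =>
      if c = 'R' then r
      else if c = 'N' then n
      else if c = 'B' then b
      else if c = 'Q' then q
      else if c = 'K' && altKingAsRook language then 'R'
      else c

def move_language_py_alt (text : String) (language : String) (capital : Bool) (short : Bool) : String :=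
  let text := if short then String.ofList (text.toList.map (altTrans language)) else text
  if capital then PySem.Str.upper text else text

-- ===== PRECONDITION & SPEC =====
def Spec_move_language_py (text : String) (language : String) (capital : Bool) (short : Bool) (out : String) : Prop := out = move_language_py_alt text language capital short
instance (text : String) (language : String) (capital : Bool) (short : Bool) (out : String) : Decidable (Spec_move_language_py text language capital short out) := by unfold Spec_move_language_py; infer_instance

-- ===== CLAIM (what is proved, stated in full; the proofs are below) =====
def Claim_equal_move_language_py : Prop := ∀ (text : String) (language : String) (capital : Bool) (short : Bool), Dom_move_language_py text language capital short → Spec_move_language_py text language capital short (move_language_py text language capital short)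

-- ===== LEMMAS AND PROOFS =====

lemma tl_0 : ("R" : String).toList = ['R'] := rfl
lemma tl_1 : ("T" : String).toList = ['T'] := rfl
lemma tl_2 : ("N" : String).toList = ['N'] := rfl
lemma tl_3 : ("S" : String).toList = ['S'] := rfl
lemma tl_4 : ("B" : String).toList = ['B'] := rfl
lemma tl_5 : ("L" : String).toList = ['L'] := rfl
lemma tl_6 : ("Q" : String).toList = ['Q'] := rfl
lemma tl_7 : ("D" : String).toList = ['D'] := rfl
lemma tl_8 : ("C" : String).toList = ['C'] := rfl
lemma tl_9 : ("F" : String).toList = ['F'] := rfl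
lemma tl_10 : ("A" : String).toList = ['A'] := rfl
lemma tl_11 : ("P" : String).toList = ['P'] := rfl
lemma tl_12 : ("K" : String).toList = ['K'] := rfl
lemma tl_13 : ("@" : String).toList = ['@'] := rfl

lemma go_single (o n : Char) : ∀ (s : List Char) (fuel : Nat) (acc : List Char), s.length ≤ fuel →
    PySem.Chars.replace.go [o] [n] fuel s acc = acc.reverse ++ s.map (fun c => if c = o then n else c) := by
  intro s
  induction s with
  | nil =>
    intro fuel acc _
    cases fuel <;> simp [PySem.Chars.replace.go]
  | cons c t ih =>
    intro fuel acc h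
    cases fuel with
    | zero => simp at h
    | succ m =>
      rw [PySem.Chars.replace.go]
      by_cases hc : c = o
      · have hp : [o].isPrefixOf (c :: t) = true := by simp [List.isPrefixOf, hc]
        simp only [hp, if_true]
        have hd : List.drop [o].length (c :: t) = t := rfl
        rw [hd]
        rw [ih m ([n].reverse ++ acc) (by simpa using h)]
        simp [hc]
      · have hp : [o].isPrefixOf (c :: t) = false := by
          simp [List.isPrefixOf]; exact fun h' => hc h'.symm
        simp only [hp, Bool.false_eq_true, if_false]
        rw [ih m (c :: acc) (by simpa using h)]
        simp [hc]

-- a single-char str.replace is a per-character map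
lemma replace_single (o n : Char) (s : List Char) :
    PySem.Chars.replace s [o] [n] = s.map (fun c => if c = o then n else c) := by
  rw [PySem.Chars.replace]
  simp [go_single o n s s.length [] le_rfl]

set_option maxHeartbeats 1600000 in
lemma chain_de (t : String) :
    PySem.Str.replace (PySem.Str.replace (PySem.Str.replace (PySem.Str.replace (PySem.Str.replace t "R" "T") "N" "S") "B" "L") "Q" "D") "@" "R"
      = String.ofList (t.toList.map (altTrans "de")) := by
  apply String.toList_inj.mp
  simp only [PySem.Str.toList_replace, tl_0, tl_1, tl_2, tl_3, tl_4, tl_5, tl_6, tl_7, tl_8, tl_9, tl_10, tl_11, tl_12, tl_13, String.toList_ofList, replace_single, List.map_map]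
  apply List.map_congr_left
  intro c _
  simp only [altTrans, altPieces, altKingAsRook, Function.comp]
  split_ifs <;> simp_all

set_option maxHeartbeats 1600000 in
lemma chain_nl (t : String) :
    PySem.Str.replace (PySem.Str.replace (PySem.Str.replace (PySem.Str.replace (PySem.Str.replace t "R" "T") "N" "P") "B" "L") "Q" "D") "@" "R"
      = String.ofList (t.toList.map (altTrans "nl")) := by
  apply String.toList_inj.mp
  simp only [PySem.Str.toList_replace, tl_0, tl_1, tl_2, tl_3, tl_4, tl_5, tl_6, tl_7, tl_8, tl_9, tl_10, tl_11, tl_12, tl_13, String.toList_ofList, replace_single, List.map_map]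
  apply List.map_congr_left
  intro c _
  simp only [altTrans, altPieces, altKingAsRook, Function.comp]
  split_ifs <;> simp_all

set_option maxHeartbeats 1600000 in
lemma chain_fr (t : String) :
    PySem.Str.replace (PySem.Str.replace (PySem.Str.replace (PySem.Str.replace (PySem.Str.replace (PySem.Str.replace t "R" "T") "N" "C") "B" "F") "Q" "D") "K" "@") "@" "R"
      = String.ofList (t.toList.map (altTrans "fr")) := by
  apply String.toList_inj.mp
  simp only [PySem.Str.toList_replace, tl_0, tl_1, tl_2, tl_3, tl_4, tl_5, tl_6, tl_7, tl_8, tl_9, tl_10, tl_11, tl_12, tl_13, String.toList_ofList, replace_single, List.map_map]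
  apply List.map_congr_left
  intro c _
  simp only [altTrans, altPieces, altKingAsRook, Function.comp]
  split_ifs <;> simp_all

set_option maxHeartbeats 1600000 in
lemma chain_es (t : String) :
    PySem.Str.replace (PySem.Str.replace (PySem.Str.replace (PySem.Str.replace (PySem.Str.replace (PySem.Str.replace t "R" "T") "N" "C") "B" "A") "Q" "D") "K" "@") "@" "R"
      = String.ofList (t.toList.map (altTrans "es")) := by
  apply String.toList_inj.mp
  simp only [PySem.Str.toList_replace, tl_0, tl_1, tl_2, tl_3, tl_4, tl_5, tl_6, tl_7, tl_8, tl_9, tl_10, tl_11, tl_12, tl_13, String.toList_ofList, replace_single, List.map_map]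
  apply List.map_congr_left
  intro c _
  simp only [altTrans, altPieces, altKingAsRook, Function.comp]
  split_ifs <;> simp_all

set_option maxHeartbeats 1600000 in
lemma chain_it (t : String) :
    PySem.Str.replace (PySem.Str.replace (PySem.Str.replace (PySem.Str.replace (PySem.Str.replace (PySem.Str.replace t "R" "T") "N" "C") "B" "A") "Q" "D") "K" "@") "@" "R"
      = String.ofList (t.toList.map (altTrans "it")) := by
  apply String.toList_inj.mp
  simp only [PySem.Str.toList_replace, tl_0, tl_1, tl_2, tl_3, tl_4, tl_5, tl_6, tl_7, tl_8, tl_9, tl_10, tl_11, tl_12, tl_13, String.toList_ofList, replace_single, List.map_map]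
  apply List.map_congr_left
  intro c _
  simp only [altTrans, altPieces, altKingAsRook, Function.comp]
  split_ifs <;> simp_all

lemma chain_other (t : String) (language : String) (h : altPieces language = none) :
    PySem.Str.replace t "@" "R" = String.ofList (t.toList.map (altTrans language)) := by
  apply String.toList_inj.mp
  simp only [PySem.Str.toList_replace, tl_13, tl_0, String.toList_ofList, replace_single]
  apply List.map_congr_left
  intro c _
  simp [altTrans, h]

-- ===== VERDICT (by name: the statement is the Claim_ definition above) =====
theorem move_language_py_spec : Claim_equal_move_language_py := by
  intro text language capital short _
  unfold Spec_move_language_py move_language_py move_language_py_alt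
  cases short with
  | false => simp
  | true =>
    simp only [if_true]
    by_cases h1 : language = "de"
    · subst h1
      simp only [String.reduceEq, reduceIte]
      have hit : (PySem.Dict.ofList [("R","T"),("N","S"),("B","L"),("Q","D")] : PySem.Dict String String).items = [("R","T"),("N","S"),("B","L"),("Q","D")] := rfl
      rw [hit]
      simp only [List.foldl_cons, List.foldl_nil]
      rw [chain_de text]
    · by_cases h2 : language = "nl"
      · subst h2
        simp only [String.reduceEq, reduceIte]
        have hit : (PySem.Dict.ofList [("R","T"),("N","P"),("B","L"),("Q","D")] : PySem.Dict String String).items = [("R","T"),("N","P"),("B","L"),("Q","D")] := rfl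
        rw [hit]
        simp only [List.foldl_cons, List.foldl_nil]
        rw [chain_nl text]
      · by_cases h3 : language = "fr"
        · subst h3
          simp only [String.reduceEq, reduceIte]
          have hit : (PySem.Dict.ofList [("R","T"),("N","C"),("B","F"),("Q","D"),("K","@")] : PySem.Dict String String).items = [("R","T"),("N","C"),("B","F"),("Q","D"),("K","@")] := rfl
          rw [hit]
          simp only [List.foldl_cons, List.foldl_nil]
          rw [chain_fr text]
        · by_cases h4 : language = "es"
          · subst h4
            simp only [String.reduceEq, reduceIte]
            have hit : (PySem.Dict.ofList [("R","T"),("N","C"),("B","A"),("Q","D"),("K","@")] : PySem.Dict String String).items = [("R","T"),("N","C"),("B","A"),("Q","D"),("K","@")] := rfl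
            rw [hit]
            simp only [List.foldl_cons, List.foldl_nil]
            rw [chain_es text]
          · by_cases h5 : language = "it"
            · subst h5
              simp only [String.reduceEq, reduceIte]
              have hit : (PySem.Dict.ofList [("R","T"),("N","C"),("B","A"),("Q","D"),("K","@")] : PySem.Dict String String).items = [("R","T"),("N","C"),("B","A"),("Q","D"),("K","@")] := rfl
              rw [hit]
              simp only [List.foldl_cons, List.foldl_nil]
              rw [chain_it text]
            · have hp : altPieces language = none := by
                simp [altPieces, h1, h2, h3, h4, h5]
              have hit : (PySem.Dict.ofList [] : PySem.Dict String String).items = [] := rfl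
              simp only [if_neg h1, if_neg h2, if_neg h3, if_neg h4, if_neg h5, hit,
                List.foldl_nil]
              rw [chain_other text language hp]
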